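-- pv_equiv track=rewrite | github.com/MrBrantCode/unitest_baseline | mut_generate/mist_train_cf/cf_28903/solution.py | generate_event_count_matrix
-- ===== SOURCE A (Python) =====
-- from typing import List, Tuple
--
-- def generate_event_count_matrix(raw_data: List[Tuple[str, int]], event_mapping_data: List[int]) -> Tuple[List[List[int]], List[int]]:
--     event_count_matrix = []
--     labels = []
--
--     unique_events = list(set(event_mapping_data))
--     unique_events.sort()
--
--     for i in range(len(raw_data)):
--         event_count = [0] * len(unique_events)
--         event_index = unique_events.index(event_mapping_data[i])
--         event_count[event_index] += 1
--         event_count_matrix.append(event_count)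
--
--     for i in range(len(event_count_matrix)):
--         if sum(event_count_matrix[i]) > 1:
--             labels.append(1)
--         else:
--             labels.append(0)
--
--     return event_count_matrix, labels
-- ===== SOURCE B (Python) =====
-- def generate_event_count_matrix(raw_data, event_mapping_data):
--     # Rank each event directly: its column is the number of DISTINCT events
--     # strictly smaller than it -- no sorting and no positional lookup needed.
--     distinct = set(event_mapping_data)
--     width = len(distinct)
--     event_count_matrix = []
--     for i in range(len(raw_data)):
--         e = event_mapping_data[i]
--         row = [0] * width
--         row[sum(1 for x in distinct if x < e)] = 1
--         event_count_matrix.append(row)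
--     # Every row is one-hot (sums to exactly 1), so no label can be 1.
--     return event_count_matrix, [0] * len(event_count_matrix)
-- ===== Notes on version B (the rewrite author's own statement) =====
-- stated objective: alternative
-- what changed: B never sorts and never searches a position: each event's column is computed arithmetically as the number of distinct events strictly smaller than it (order-isomorphism rank), and the labels list is emitted in closed form as all zeros because every one-hot row sums to exactly 1, eliminating A's sort, its per-row .index scan and its entire second labelling loop.
import Mathlib
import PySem

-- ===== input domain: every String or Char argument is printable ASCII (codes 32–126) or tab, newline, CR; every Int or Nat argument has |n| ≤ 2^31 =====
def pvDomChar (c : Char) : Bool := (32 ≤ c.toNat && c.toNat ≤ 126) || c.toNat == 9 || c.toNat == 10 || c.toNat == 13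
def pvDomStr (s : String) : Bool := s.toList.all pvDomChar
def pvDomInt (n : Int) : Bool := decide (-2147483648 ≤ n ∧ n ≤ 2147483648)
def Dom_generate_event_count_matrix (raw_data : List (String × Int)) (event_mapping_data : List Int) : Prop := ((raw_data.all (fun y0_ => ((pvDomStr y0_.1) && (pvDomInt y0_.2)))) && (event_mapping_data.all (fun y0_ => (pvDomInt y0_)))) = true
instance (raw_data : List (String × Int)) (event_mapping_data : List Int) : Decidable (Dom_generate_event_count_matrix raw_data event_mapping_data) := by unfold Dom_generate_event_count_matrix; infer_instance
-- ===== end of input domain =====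

-- B replaces A's sort + per-row positional .index search + second labelling loop by a
-- direct rank computation (column = number of distinct events strictly smaller) and a
-- closed-form all-zero labels list (alternative algorithm, no speed claim).

-- ===== PORT A =====
def generate_event_count_matrix (raw_data : List (String × Int)) (event_mapping_data : List Int) : List (List Int) × List Int :=
  let unique_events := PySem.List.sorted (PySem.Set.ofList event_mapping_data) (fun x => x) false
  let event_count_matrix :=
    (PySem.List.pyRange 0 (raw_data.length : Int) 1).foldl (fun acc i =>
      match PySem.List.pyGet? event_mapping_data i with
      | some e =>
        match PySem.List.index? unique_events e with
        | some j => acc ++ [(List.replicate unique_events.length (0:Int)).modify j (· + 1)]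
        | none => acc   -- ValueError (never reached: every indexed event is in unique_events)
      | none => acc     -- IndexError, excluded by Pre_
      ) []
  let labels :=
    (PySem.List.pyRange 0 (event_count_matrix.length : Int) 1).foldl (fun acc i =>
      if (PySem.List.pyGetD event_count_matrix i []).sum > 1 then acc ++ [(1:Int)] else acc ++ [(0:Int)]) []
  (event_count_matrix, labels)

-- ===== PORT B =====
def generate_event_count_matrix_alt (raw_data : List (String × Int)) (event_mapping_data : List Int) : List (List Int) × List Int :=
  let distinct := PySem.Set.ofList event_mapping_data
  let width := distinct.length
  let event_count_matrix :=
    (PySem.List.pyRange 0 (raw_data.length : Int) 1).foldl (fun acc i =>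
      match PySem.List.pyGet? event_mapping_data i with
      | some e =>
        -- row = [0]*width; row[rank] = 1  (rank always in range: e ∈ distinct)
        acc ++ [(List.replicate width (0:Int)).set (distinct.countP (fun x => decide (x < e))) 1]
      | none => acc     -- IndexError, excluded by Pre_
      ) []
  (event_count_matrix, List.replicate event_count_matrix.length (0:Int))

-- ===== PRECONDITION & SPEC =====
-- Pre_ excludes exactly the inputs where A raises (IndexError when raw_data is longer
-- than event_mapping_data); B raises there too.
def Pre_generate_event_count_matrix (raw_data : List (String × Int)) (event_mapping_data : List Int) : Prop :=
  raw_data.length ≤ event_mapping_data.length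
instance (raw_data : List (String × Int)) (event_mapping_data : List Int) : Decidable (Pre_generate_event_count_matrix raw_data event_mapping_data) := by unfold Pre_generate_event_count_matrix; infer_instance
def pvWitness_generate_event_count_matrix : (List (String × Int)) × List Int := ([("a", 1)], [5, 7])

def Spec_generate_event_count_matrix (raw_data : List (String × Int)) (event_mapping_data : List Int) (out : List (List Int) × List Int) : Prop := out = generate_event_count_matrix_alt raw_data event_mapping_data
instance (raw_data : List (String × Int)) (event_mapping_data : List Int) (out : List (List Int) × List Int) : Decidable (Spec_generate_event_count_matrix raw_data event_mapping_data out) := by unfold Spec_generate_event_count_matrix; infer_instance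

-- ===== CLAIM (what is proved, stated in full; the proofs are below) =====
def Claim_equal_generate_event_count_matrix : Prop := ∀ (raw_data : List (String × Int)) (event_mapping_data : List Int), Dom_generate_event_count_matrix raw_data event_mapping_data → Pre_generate_event_count_matrix raw_data event_mapping_data → Spec_generate_event_count_matrix raw_data event_mapping_data (generate_event_count_matrix raw_data event_mapping_data)

-- ===== LEMMAS AND PROOFS =====

-- In a strictly increasing list the position of an element is the number of
-- (necessarily earlier) elements strictly below it.
theorem pvIndexRank (s : List Int) (hs : s.Pairwise (· < ·)) :
    ∀ e ∈ s, PySem.List.index? s e = some (s.countP (fun x => decide (x < e))) := by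
  induction s with
  | nil => intro e he; cases he
  | cons a t ih =>
    intro e he
    rcases List.pairwise_cons.mp hs with ⟨ha, ht⟩
    by_cases hae : a = e
    · subst hae
      have h0 : t.countP (fun x => decide (x < a)) = 0 := by
        rw [List.countP_eq_zero]
        intro x hx
        simp only [decide_eq_true_eq, not_lt]
        exact le_of_lt (ha x hx)
      rw [PySem.List.index?_cons_self]
      simp [h0]
    · have het : e ∈ t := by
        rcases List.mem_cons.mp he with h | h
        · exact absurd h.symm hae
        · exact h
      have hlt : a < e := ha e het
      rw [PySem.List.index?_cons_of_ne t hae, ih ht e het]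
      simp [hlt, Nat.add_comm]

-- incrementing a zero cell is writing 1 into it
theorem pvRowEq (n j : Nat) :
    (List.replicate n (0:Int)).modify j (· + 1) = (List.replicate n (0:Int)).set j 1 := by
  apply List.ext_getElem
  · simp
  · intro i h1 h2
    simp only [List.getElem_modify, List.getElem_set]
    split_ifs <;> simp_all

theorem pvRowSum (n j : Nat) (hj : j < n) :
    ((List.replicate n (0:Int)).set j 1).sum = 1 := by
  induction n generalizing j with
  | zero => omega
  | succ m ih =>
    cases j with
    | zero => simp [List.replicate_succ, List.sum_replicate]
    | succ k =>
      have := ih k (by omega)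
      simp only [List.replicate_succ, List.set_cons_succ, List.sum_cons, this]
      omega

theorem pvFoldSingleton {α β : Type} (l : List α) (g : α → β) :
    ∀ (m : List β), l.foldl (fun acc x => acc ++ [g x]) m = m ++ l.map g := by
  intro m; simpa using PySem.List.foldl_append_singleton_eq_map g l m

-- ===== VERDICT (by name: the statement is the Claim_ definition above) =====
theorem generate_event_count_matrix_spec : Claim_equal_generate_event_count_matrix := by
  intro raw emd _hdom hpre
  unfold Pre_generate_event_count_matrix at hpre
  unfold Spec_generate_event_count_matrix generate_event_count_matrix generate_event_count_matrix_alt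
  simp only
  set dset := PySem.Set.ofList emd with hdset
  set uniq := PySem.List.sorted dset (fun x => x) false with huniq
  have hperm : uniq.Perm dset := PySem.List.sorted_perm dset (fun x => x) false
  have hlen : uniq.length = dset.length := hperm.length_eq
  have hinc : uniq.Pairwise (· < ·) := PySem.List.sorted_ofList_pairwise_lt emd
  set r := PySem.List.pyRange 0 (raw.length : Int) 1 with hr
  set gB : Int → List Int := fun i =>
    (List.replicate dset.length (0:Int)).set
      (dset.countP (fun x => decide (x < PySem.List.pyGetD emd i 0))) 1 with hgB
  -- per-element facts on the range
  have hfacts : ∀ i ∈ r,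
      PySem.List.pyGet? emd i = some (PySem.List.pyGetD emd i 0) ∧
      PySem.List.pyGetD emd i 0 ∈ uniq := by
    intro i hi
    obtain ⟨h0, h1⟩ := PySem.List.mem_pyRange_one.mp hi
    have h2 : i < (emd.length : Int) := lt_of_lt_of_le h1 (by exact_mod_cast hpre)
    have hg : PySem.List.pyGet? emd i = some emd[i.toNat] :=
      PySem.List.pyGet?_eq_some_getElem emd h0 h2
    have hgd : PySem.List.pyGetD emd i 0 = emd[i.toNat] := by
      simp [PySem.List.pyGetD, hg]
    refine ⟨by rw [hg, hgd], ?_⟩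
    rw [huniq, PySem.List.mem_sorted, hdset, PySem.Set.mem_ofList, hgd]
    exact List.getElem_mem _
  have hrank : ∀ i ∈ r, ∀ e, e = PySem.List.pyGetD emd i 0 →
      PySem.List.index? uniq e = some (dset.countP (fun x => decide (x < e))) ∧
      dset.countP (fun x => decide (x < e)) < dset.length := by
    intro i hi e he
    have hmem : e ∈ uniq := he ▸ (hfacts i hi).2
    have hidx := pvIndexRank uniq hinc e hmem
    have hcnt : uniq.countP (fun x => decide (x < e)) = dset.countP (fun x => decide (x < e)) :=
      hperm.countP_eq _
    refine ⟨by rw [hidx, hcnt], ?_⟩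
    obtain ⟨hk, -, -⟩ := PySem.List.getElem_of_index?_eq_some (by rw [hidx, hcnt] : PySem.List.index? uniq e = some (dset.countP (fun x => decide (x < e))))
    omega
  -- A's matrix = B's matrix = r.map gB
  have hA : r.foldl (fun acc i =>
      match PySem.List.pyGet? emd i with
      | some e =>
        match PySem.List.index? uniq e with
        | some j => acc ++ [(List.replicate uniq.length (0:Int)).modify j (· + 1)]
        | none => acc
      | none => acc) [] = r.map gB := by
    rw [PySem.List.foldl_congr_mem _ _ (fun acc i => acc ++ [gB i]) _ ?_]
    · exact pvFoldSingleton r gB []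
    · intro acc i hi
      obtain ⟨h1, -⟩ := hfacts i hi
      obtain ⟨hidx, hlt⟩ := hrank i hi _ rfl
      rw [h1]
      simp only [hidx, hgB]
      rw [hlen, pvRowEq]
  have hB : r.foldl (fun acc i =>
      match PySem.List.pyGet? emd i with
      | some e =>
        acc ++ [(List.replicate dset.length (0:Int)).set (dset.countP (fun x => decide (x < e))) 1]
      | none => acc) [] = r.map gB := by
    rw [PySem.List.foldl_congr_mem _ _ (fun acc i => acc ++ [gB i]) _ ?_]
    · exact pvFoldSingleton r gB []
    · intro acc i hi
      obtain ⟨h1, -⟩ := hfacts i hi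
      rw [h1]
  rw [hA, hB]
  -- labels: A's second loop over the matrix yields all zeros
  have hlab : (PySem.List.pyRange 0 ((r.map gB).length : Int) 1).foldl (fun acc i =>
      if (PySem.List.pyGetD (r.map gB) i []).sum > 1 then acc ++ [(1:Int)] else acc ++ [(0:Int)]) []
      = List.replicate (r.map gB).length (0:Int) := by
    rw [PySem.List.foldl_pyRange_zero_pyGetD' (r.map gB) ([] : List Int)
      (fun acc row => if row.sum > 1 then acc ++ [(1:Int)] else acc ++ [(0:Int)]) []]
    rw [PySem.List.foldl_congr_mem _ _ (fun acc (_ : List Int) => acc ++ [(0:Int)]) _ ?_]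
    · rw [pvFoldSingleton]
      exact List.map_const'
    · intro acc row hrow
      obtain ⟨i, hi, hrowi⟩ := List.mem_map.mp hrow
      have hs : row.sum = 1 := by
        rw [← hrowi, hgB]
        exact pvRowSum _ _ (hrank i hi _ rfl).2
      simp [hs]
  rw [hlab]
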